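-- pv_equiv track=rewrite | github.com/maxipdev/Introduccion-a-la-programacion-1-UBA | python/clase_repaso.py | subsecuencia_mas_larga
-- ===== SOURCE A (Python) =====
-- def subsecuencia_mas_larga(lista: list[str]) -> int:
--     contador = 0
--     posicion_inicial = 0
--     cambio_posicion = False
--     lista_de_resultados: list[tuple[int, int]] = []
--     for i in range(len(lista)):
--         if lista[i] == "gato" or lista[i] == "perro":
--             if contador == 0:
--                 posicion_inicial = i
--             contador += 1
--         else:
--             lista_de_resultados.append((contador, posicion_inicial))
--             contador = 0
--
--     lista_de_resultados.append((contador, posicion_inicial))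
--
--     cant_base = 0
--     coordenadas = 0
--     for cantidad, posicion in lista_de_resultados:
--         if cantidad > cant_base :
--             cant_base = cantidad
--             coordenadas = posicion
--     return coordenadas
-- ===== SOURCE B (Python) =====
-- def subsecuencia_mas_larga(lista: list[str]) -> int:
--     cur = 0
--     cur_start = 0
--     best_len = 0
--     best_pos = 0
--     for i, x in enumerate(lista):
--         if x == "gato" or x == "perro":
--             if cur == 0:
--                 cur_start = i
--             cur += 1
--             if cur > best_len:
--                 best_len = cur
--                 best_pos = cur_start
--         else:
--             cur = 0
--     return best_pos
-- ===== Notes on version B (the rewrite author's own statement) =====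
-- stated objective: simpler
-- what changed: Single one-pass loop maintaining current run and best (length,start) directly, dropping A's intermediate list of (count,start) tuples and its entire second selection scan.
import Mathlib
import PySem

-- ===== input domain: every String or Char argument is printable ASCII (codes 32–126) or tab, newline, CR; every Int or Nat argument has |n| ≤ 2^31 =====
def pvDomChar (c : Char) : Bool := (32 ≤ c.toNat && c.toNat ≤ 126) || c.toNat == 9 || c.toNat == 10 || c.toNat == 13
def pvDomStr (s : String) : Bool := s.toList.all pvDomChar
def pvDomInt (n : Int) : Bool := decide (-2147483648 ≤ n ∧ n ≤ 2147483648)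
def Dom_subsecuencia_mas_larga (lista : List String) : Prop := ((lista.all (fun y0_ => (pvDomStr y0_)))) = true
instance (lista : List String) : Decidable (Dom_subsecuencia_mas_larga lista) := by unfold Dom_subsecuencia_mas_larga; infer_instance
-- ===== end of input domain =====

-- B replaces A's two-phase algorithm (collect (count,start) tuples, then scan them) by a
-- single pass keeping the best run so far; objective: simpler (O(1) extra space).

-- ===== PORT A =====
-- first loop of A: state (contador, posicion_inicial, lista_de_resultados), index i
def pvALoop (l : List String) (i contador posicion_inicial : Int)
    (res : List (Int × Int)) : Int × Int × List (Int × Int) :=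
  match l with
  | [] => (contador, posicion_inicial, res)
  | x :: rest =>
    if x = "gato" ∨ x = "perro" then
      let p := if contador = 0 then i else posicion_inicial
      pvALoop rest (i + 1) (contador + 1) p res
    else
      pvALoop rest (i + 1) 0 posicion_inicial (res ++ [(contador, posicion_inicial)])

-- second loop of A: 'if cantidad > cant_base then update'
def pvSelStep (b : Int × Int) (cp : Int × Int) : Int × Int :=
  if cp.1 > b.1 then cp else b

def subsecuencia_mas_larga (lista : List String) : Int :=
  let s := pvALoop lista 0 0 0 []
  (List.foldl pvSelStep (0, 0) (s.2.2 ++ [(s.1, s.2.1)])).2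

-- ===== PORT B =====
def pvBLoop (l : List String) (i cur cur_start best_len best_pos : Int) : Int :=
  match l with
  | [] => best_pos
  | x :: rest =>
    if x = "gato" ∨ x = "perro" then
      let s := if cur = 0 then i else cur_start
      let cur' := cur + 1
      if cur' > best_len then pvBLoop rest (i + 1) cur' s cur' s
      else pvBLoop rest (i + 1) cur' s best_len best_pos
    else
      pvBLoop rest (i + 1) 0 cur_start best_len best_pos

def subsecuencia_mas_larga_alt (lista : List String) : Int :=
  pvBLoop lista 0 0 0 0 0

-- ===== PRECONDITION & SPEC =====
def Spec_subsecuencia_mas_larga (lista : List String) (out : Int) : Prop := out = subsecuencia_mas_larga_alt lista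
instance (lista : List String) (out : Int) : Decidable (Spec_subsecuencia_mas_larga lista out) := by unfold Spec_subsecuencia_mas_larga; infer_instance

-- ===== CLAIM (what is proved, stated in full; the proofs are below) =====
def Claim_equal_subsecuencia_mas_larga : Prop := ∀ (lista : List String), Dom_subsecuencia_mas_larga lista → Spec_subsecuencia_mas_larga lista (subsecuencia_mas_larga lista)

-- ===== LEMMAS AND PROOFS =====

lemma pvSel_fst_mono (res : List (Int × Int)) (b : Int × Int) :
    b.1 ≤ (List.foldl pvSelStep b res).1 := by
  induction res generalizing b with
  | nil => simp
  | cons cp rest ih =>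
    simp only [List.foldl_cons]
    refine le_trans ?_ (ih (pvSelStep b cp))
    unfold pvSelStep
    split_ifs with h
    · exact le_of_lt h
    · exact le_rfl

lemma pvSelStep_zero (b : Int × Int) (p : Int) (h : 0 ≤ b.1) : pvSelStep b (0, p) = b := by
  unfold pvSelStep
  rw [if_neg (by simp only [not_lt]; simpa using h)]

-- the invariant: B's (best_len, best_pos) equals the selection fold over A's collected
-- results extended with the current run
lemma pv_main (l : List String) : ∀ (i c pos : Int) (res : List (Int × Int)), 0 ≤ c →
    (List.foldl pvSelStep (0, 0)
      ((pvALoop l i c pos res).2.2 ++ [((pvALoop l i c pos res).1, (pvALoop l i c pos res).2.1)])).2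
    = pvBLoop l i c pos
        (List.foldl pvSelStep (0, 0) (res ++ [(c, pos)])).1
        (List.foldl pvSelStep (0, 0) (res ++ [(c, pos)])).2 := by
  induction l with
  | nil =>
    intro i c pos res _
    simp [pvALoop, pvBLoop]
  | cons x rest ih =>
    intro i c pos res hc
    by_cases hx : x = "gato" ∨ x = "perro"
    · simp only [pvALoop, pvBLoop, if_pos hx]
      set p := (if c = 0 then i else pos) with hp
      have hR : 0 ≤ (List.foldl pvSelStep (0, 0) res).1 := pvSel_fst_mono res (0, 0)
      set R := List.foldl pvSelStep (0, 0) res with hRdef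
      have hcur : List.foldl pvSelStep (0, 0) (res ++ [(c, pos)]) = pvSelStep R (c, pos) := by
        simp [List.foldl_append, hRdef]
      have hnew : List.foldl pvSelStep (0, 0) (res ++ [(c + 1, p)]) = pvSelStep R (c + 1, p) := by
        simp [List.foldl_append, hRdef]
      rw [ih (i + 1) (c + 1) p res (by omega), hcur, hnew]
      unfold pvSelStep
      by_cases h1 : c > R.1
      · rw [if_pos h1]
        simp only [if_pos (show c + 1 > R.1 by omega), if_pos (show c + 1 > c by omega)]
      · rw [if_neg h1]
        by_cases h2 : c + 1 > R.1
        · simp [h2]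
        · simp [h2]
    · simp only [pvALoop, pvBLoop, if_neg hx]
      rw [ih (i + 1) 0 pos (res ++ [(c, pos)]) le_rfl]
      have hb : (List.foldl pvSelStep (0, 0) ((res ++ [(c, pos)]) ++ [(0, pos)]))
          = List.foldl pvSelStep (0, 0) (res ++ [(c, pos)]) := by
        rw [List.foldl_append]
        simp only [List.foldl_cons, List.foldl_nil]
        exact pvSelStep_zero _ _ (by simpa using pvSel_fst_mono (res ++ [(c, pos)]) (0, 0))
      rw [hb]

-- ===== VERDICT (by name: the statement is the Claim_ definition above) =====
theorem subsecuencia_mas_larga_spec : Claim_equal_subsecuencia_mas_larga := by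
  intro lista _
  unfold Spec_subsecuencia_mas_larga subsecuencia_mas_larga subsecuencia_mas_larga_alt
  have h := pv_main lista 0 0 0 [] le_rfl
  simp only [List.nil_append] at h
  simpa [pvSelStep] using h
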